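-- pv_equiv track=rewrite | github.com/NazariyKabak/PythonStudy | BookPython/str/task.py | matured_numbers
-- ===== SOURCE A (Python) =====
-- def flatten(lst):
--     return [item for sublist in lst for item in sublist]
--
-- def matured_numbers(numbers, top_n=10):
--     flat = flatten(numbers)
--     last_seen = [-1] * 70  # з 0 по 69
--     for idx, draw in enumerate(numbers):
--         for num in draw:
--             last_seen[num] = idx
--     result = []
--     for i in range(1, 70):
--         if last_seen[i] != -1:
--             result.append((i, last_seen[i]))
--     result.sort(key=lambda x: x[1])
--     return result[:top_n]
-- ===== SOURCE B (Python) =====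
-- def matured_numbers(numbers, top_n=10):
--     last_seen = [-1] * 70
--     for idx, draw in enumerate(numbers):
--         for num in draw:
--             last_seen[num] = idx
--     # bucket (counting) sort by last-seen draw index instead of a comparison sort
--     buckets = [[] for _ in range(len(numbers))]
--     for i in range(1, 70):
--         v = last_seen[i]
--         if v != -1:
--             buckets[v].append(i)
--     out = []
--     for d, bucket in enumerate(buckets):
--         for i in bucket:
--             out.append((i, d))
--     return out[:top_n]
-- ===== Notes on version B (the rewrite author's own statement) =====
-- stated objective: alternative
-- what changed: Replaces collecting (number, last_seen) pairs and comparison-sorting them by draw index with a counting/bucket sort: numbers are dropped into per-draw-index buckets and the buckets are walked in ascending order, which reproduces the stable sort order.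
import Mathlib
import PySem

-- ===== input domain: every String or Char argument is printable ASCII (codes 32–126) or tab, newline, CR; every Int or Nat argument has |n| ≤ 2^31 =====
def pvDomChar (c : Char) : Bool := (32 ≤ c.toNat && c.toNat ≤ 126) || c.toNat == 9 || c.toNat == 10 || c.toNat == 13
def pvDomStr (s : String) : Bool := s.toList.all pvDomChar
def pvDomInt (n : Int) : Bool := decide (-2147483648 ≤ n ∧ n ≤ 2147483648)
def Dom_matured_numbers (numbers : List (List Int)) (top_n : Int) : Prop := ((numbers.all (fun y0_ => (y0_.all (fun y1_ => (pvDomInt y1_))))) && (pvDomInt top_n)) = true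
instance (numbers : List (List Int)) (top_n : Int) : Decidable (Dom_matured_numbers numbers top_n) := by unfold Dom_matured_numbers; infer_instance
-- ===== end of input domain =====

-- B replaces A's comparison sort of (number, last-seen-index) pairs by a counting/bucket
-- sort over per-draw-index buckets; same return value, similar cost.

-- ===== PORT A =====
def pvFlatten (lst : List (List Int)) : List Int :=
  lst.flatMap (fun sublist => sublist.map (fun item => item))

def matured_numbers (numbers : List (List Int)) (top_n : Int) : List (Int × Int) :=
  let _flat := pvFlatten numbers
  let last_seen : List Int := List.replicate 70 (-1)
  let last_seen := (PySem.List.enumerate numbers 0).foldl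
    (fun ls p => p.2.foldl (fun ls num => PySem.List.pySetD ls num p.1) ls) last_seen
  let result : List (Int × Int) := (PySem.List.pyRange 1 70 1).foldl
    (fun acc i => if PySem.List.pyGetD last_seen i (-1) ≠ -1
      then acc ++ [(i, PySem.List.pyGetD last_seen i (-1))] else acc) []
  let result := PySem.List.sorted result (fun x => x.2) false
  PySem.List.slice result none (some top_n)

-- ===== PORT B =====
def matured_numbers_alt (numbers : List (List Int)) (top_n : Int) : List (Int × Int) :=
  let last_seen : List Int := List.replicate 70 (-1)
  let last_seen := (PySem.List.enumerate numbers 0).foldl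
    (fun ls p => p.2.foldl (fun ls num => PySem.List.pySetD ls num p.1) ls) last_seen
  let buckets : List (List Int) := List.replicate numbers.length []
  let buckets := (PySem.List.pyRange 1 70 1).foldl
    (fun bs i =>
      let v := PySem.List.pyGetD last_seen i (-1)
      if v ≠ -1 then PySem.List.pySetD bs v (PySem.List.pyGetD bs v [] ++ [i]) else bs) buckets
  let out : List (Int × Int) := (PySem.List.enumerate buckets 0).foldl
    (fun acc p => p.2.foldl (fun acc i => acc ++ [(i, p.1)]) acc) []
  PySem.List.slice out none (some top_n)

-- ===== PRECONDITION & SPEC =====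
-- Pre_ excludes exactly the inputs where A raises IndexError: a drawn number outside [-70, 70).
def Pre_matured_numbers (numbers : List (List Int)) (top_n : Int) : Prop :=
  ∀ draw ∈ numbers, ∀ num ∈ draw, PySem.Raise.InRange 70 num
instance (numbers : List (List Int)) (top_n : Int) : Decidable (Pre_matured_numbers numbers top_n) := by unfold Pre_matured_numbers; infer_instance

def pvWitness_matured_numbers : List (List Int) × Int := ([[3, 5], [5, 1]], 10)

def Spec_matured_numbers (numbers : List (List Int)) (top_n : Int) (out : List (Int × Int)) : Prop := out = matured_numbers_alt numbers top_n
instance (numbers : List (List Int)) (top_n : Int) (out : List (Int × Int)) : Decidable (Spec_matured_numbers numbers top_n out) := by unfold Spec_matured_numbers; infer_instance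

-- ===== CLAIM (what is proved, stated in full; the proofs are below) =====
def Claim_equal_matured_numbers : Prop := ∀ (numbers : List (List Int)) (top_n : Int), Dom_matured_numbers numbers top_n → Pre_matured_numbers numbers top_n → Spec_matured_numbers numbers top_n (matured_numbers numbers top_n)

-- ===== LEMMAS AND PROOFS =====

-- a flatMap congruence helper
theorem pv_flatMap_congr {α β : Type} (l : List α) (f g : α → List β)
    (h : ∀ a ∈ l, f a = g a) : l.flatMap f = l.flatMap g := by
  simp only [List.flatMap_def]
  rw [List.map_congr_left h]

theorem pv_flatMap_nil {α β : Type} (l : List α) : l.flatMap (fun _ => ([] : List β)) = [] := by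
  induction l with
  | nil => rfl
  | cons a l ih => simp [List.flatMap_cons, ih]

-- insertBy into A ++ B with x going exactly between
theorem pv_insertBy_split {α : Type} (before : α → α → Bool) (x : α) (A B : List α)
    (hA : ∀ a ∈ A, before x a = false) (hB : ∀ b ∈ B, before x b = true) :
    PySem.List.insertBy before x (A ++ B) = A ++ x :: B := by
  induction A with
  | nil =>
    cases B with
    | nil => simp [PySem.List.insertBy]
    | cons b bs =>
      simp only [List.nil_append]
      rw [PySem.List.insertBy.eq_2, hB b (by simp)]
      simp
  | cons a A ih =>
    simp only [List.cons_append]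
    rw [PySem.List.insertBy.eq_2, hA a (by simp)]
    simp only [Bool.false_eq_true, if_false, List.cons.injEq, true_and]
    exact ih (fun a ha => hA a (by simp [ha])) 

-- Stable sort by second component = concatenation of per-value buckets
theorem pv_sorted_eq_flatMap_filter (xs : List (Int × Int)) (n : Int)
    (h : ∀ p ∈ xs, 0 ≤ p.2 ∧ p.2 < n) :
    PySem.List.sorted xs (fun p => p.2) false
      = (PySem.List.pyRange 0 n 1).flatMap (fun d => xs.filter (fun p => decide (p.2 = d))) := by
  induction xs using List.reverseRecOn with
  | nil =>
    rw [PySem.List.sorted_eq_foldl_insertBy]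
    simp [pv_flatMap_nil]
  | append_singleton xs x ih =>
    have hx := h x (by simp)
    have hxs : ∀ p ∈ xs, 0 ≤ p.2 ∧ p.2 < n := fun p hp => h p (by simp [hp])
    rw [PySem.List.sorted_eq_foldl_insertBy, List.foldl_append,
        ← PySem.List.sorted_eq_foldl_insertBy, ih hxs]
    simp only [List.foldl_cons, List.foldl_nil]
    set e := x.2 with he
    have hsplit : PySem.List.pyRange 0 n 1
        = PySem.List.pyRange 0 (e + 1) 1 ++ PySem.List.pyRange (e + 1) n 1 :=
      PySem.List.pyRange_one_append 0 (e + 1) n (by omega) (by omega)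
    have hsplit2 : PySem.List.pyRange 0 (e + 1) 1
        = PySem.List.pyRange 0 e 1 ++ [e] := by
      rw [PySem.List.pyRange_one_append 0 e (e + 1) (by omega) (by omega),
          PySem.List.pyRange_one_singleton]
    set F : Int → List (Int × Int) := fun d => xs.filter (fun p => decide (p.2 = d)) with hF
    have hmemF : ∀ d, ∀ a ∈ F d, a.2 = d := by
      intro d a ha
      simpa using (List.mem_filter.mp ha).2
    have hLHS : PySem.List.insertBy (fun a b => decide (a.2 < b.2)) x
        ((PySem.List.pyRange 0 n 1).flatMap F)
        = (PySem.List.pyRange 0 (e + 1) 1).flatMap F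
          ++ x :: (PySem.List.pyRange (e + 1) n 1).flatMap F := by
      rw [hsplit, List.flatMap_append]
      apply pv_insertBy_split
      · intro a ha
        rcases List.mem_flatMap.mp ha with ⟨d, hd, haf⟩
        have hd' := (PySem.List.mem_pyRange_one).mp hd
        have := hmemF d a haf
        simp only [decide_eq_false_iff_not, not_lt, ← he]
        omega
      · intro b hb
        rcases List.mem_flatMap.mp hb with ⟨d, hd, hbf⟩
        have hd' := (PySem.List.mem_pyRange_one).mp hd
        have := hmemF d b hbf
        simp only [decide_eq_true_eq, ← he]
        omega
    rw [hLHS]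
    -- now rewrite the RHS: filter over xs ++ [x]
    have hfil : ∀ d, (xs ++ [x]).filter (fun p => decide (p.2 = d))
        = F d ++ (if e = d then [x] else []) := by
      intro d
      rw [List.filter_append]
      congr 1
      by_cases hde : e = d <;> simp [List.filter, ← he, hde]
    conv_rhs => rw [hsplit]
    rw [List.flatMap_append]
    have h1 : (PySem.List.pyRange 0 (e + 1) 1).flatMap
        (fun d => (xs ++ [x]).filter (fun p => decide (p.2 = d)))
        = (PySem.List.pyRange 0 (e + 1) 1).flatMap F ++ [x] := by
      rw [hsplit2]
      rw [List.flatMap_append, List.flatMap_append]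
      have hlow : (PySem.List.pyRange 0 e 1).flatMap
          (fun d => (xs ++ [x]).filter (fun p => decide (p.2 = d)))
          = (PySem.List.pyRange 0 e 1).flatMap F := by
        apply pv_flatMap_congr
        intro d hd
        have hd' := (PySem.List.mem_pyRange_one).mp hd
        rw [hfil d, if_neg (by omega)]
        simp
      rw [hlow]
      have hxe : x.2 = e := he.symm
      simp [hF, List.filter, hxe]
    have h2 : (PySem.List.pyRange (e + 1) n 1).flatMap
        (fun d => (xs ++ [x]).filter (fun p => decide (p.2 = d)))
        = (PySem.List.pyRange (e + 1) n 1).flatMap F := by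
      apply pv_flatMap_congr
      intro d hd
      have hd' := (PySem.List.mem_pyRange_one).mp hd
      rw [hfil d, if_neg (by omega)]
      simp
    rw [h1, h2]
    simp

-- membership after a Python-style element assignment
theorem pv_mem_pySetD {α : Type} (xs : List α) (i : Int) (v x : α)
    (hx : x ∈ PySem.List.pySetD xs i v) : x ∈ xs ∨ x = v := by
  unfold PySem.List.pySetD PySem.List.pySet? at hx
  cases h : PySem.List.pyIdx? xs.length i with
  | none => rw [h] at hx; simp at hx; exact Or.inl hx
  | some k =>
    rw [h] at hx; simp at hx
    exact List.mem_or_eq_of_mem_set hx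

-- one draw's inner assignment loop preserves a predicate on the entries
theorem pv_draw_fold_mem {Q : Int → Prop} (draw : List Int) (idx : Int) (hidx : Q idx) :
    ∀ (ls : List Int), (∀ v ∈ ls, Q v) →
      ∀ v ∈ draw.foldl (fun ls num => PySem.List.pySetD ls num idx) ls, Q v := by
  induction draw with
  | nil => intro ls h v hv; exact h v hv
  | cons num draw ih =>
    intro ls h v hv
    refine ih (PySem.List.pySetD ls num idx) ?_ v hv
    intro w hw
    rcases pv_mem_pySetD ls num idx w hw with h' | h'
    · exact h w h'
    · exact h' ▸ hidx

-- the enumerate fold over all draws preserves the predicate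
theorem pv_pairs_fold_mem {Q : Int → Prop} (pairs : List (Int × List Int))
    (hp : ∀ p ∈ pairs, Q p.1) :
    ∀ (ls : List Int), (∀ v ∈ ls, Q v) →
      ∀ v ∈ pairs.foldl (fun ls p => p.2.foldl (fun ls num => PySem.List.pySetD ls num p.1) ls) ls, Q v := by
  induction pairs with
  | nil => intro ls h v hv; exact h v hv
  | cons p pairs ih =>
    intro ls h v hv
    refine ih (fun q hq => hp q (by simp [hq])) _ ?_ v hv
    exact pv_draw_fold_mem p.2 p.1 (hp p (by simp)) ls h

-- every entry of the computed last_seen list is -1 or a valid draw index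
theorem pv_lastSeen_mem (numbers : List (List Int)) :
    ∀ v ∈ (PySem.List.enumerate numbers 0).foldl
      (fun ls p => p.2.foldl (fun ls num => PySem.List.pySetD ls num p.1) ls)
      (List.replicate 70 (-1 : Int)),
      v = -1 ∨ (0 ≤ v ∧ v < (numbers.length : Int)) := by
  apply pv_pairs_fold_mem
  · intro p hp
    rcases (PySem.List.mem_enumerate_iff _ _ _).mp hp with ⟨k, hk, hpk⟩
    right
    rw [hpk]
    simp
    omega
  · intro v hv
    left
    exact (List.eq_of_mem_replicate hv)

-- the bucket-filling loop computes per-index filters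
theorem pv_bucket_loop (n : Nat) (lsD : Int → Int)
    (hls : ∀ i, lsD i = -1 ∨ (0 ≤ lsD i ∧ lsD i < (n : Int)))
    (L : List Int) (g : Int → List Int) :
    L.foldl (fun bs i =>
        if lsD i ≠ -1 then PySem.List.pySetD bs (lsD i) (PySem.List.pyGetD bs (lsD i) [] ++ [i]) else bs)
      ((PySem.List.pyRange 0 (n : Int) 1).map g)
    = (PySem.List.pyRange 0 (n : Int) 1).map
        (fun d => g d ++ L.filter (fun i => decide (lsD i = d))) := by
  induction L generalizing g with
  | nil => simp
  | cons i L ih =>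
    rw [List.foldl_cons]
    by_cases hv : lsD i = -1
    · rw [if_neg (by simp [hv]), ih g]
      apply List.map_congr_left
      intro d hd
      have hd' := (PySem.List.mem_pyRange_one).mp hd
      rw [List.filter_cons, if_neg (by simp; omega)]
    · have hv0 : 0 ≤ lsD i ∧ lsD i < (n : Int) := by
        rcases hls i with h' | h'
        · exact absurd h' hv
        · exact h'
      rw [if_pos (by simp [hv])]
      rw [PySem.List.pyGetD_map_pyRange_of_nonneg g (n : Int) (lsD i) [] hv0.1 hv0.2]
      have hset : PySem.List.pySetD ((PySem.List.pyRange 0 (n : Int) 1).map g) (lsD i) (g (lsD i) ++ [i])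
          = (PySem.List.pyRange 0 (n : Int) 1).map
              (fun d => if d = lsD i then g (lsD i) ++ [i] else g d) := by
        rw [PySem.List.pySetD_of_nonneg _ _ hv0.1]
        apply List.ext_getElem
        · simp
        · intro k h1 h2
          simp only [List.getElem_set, List.getElem_map]
          have hlen : k < (PySem.List.pyRange 0 (n : Int) 1).length := by
            rw [List.length_map] at h2; exact h2
          have hk := PySem.List.getElem_pyRange_one 0 (n : Int) k hlen
          rw [hk]
          by_cases hkv : (lsD i).toNat = k
          · rw [if_pos hkv, if_pos (by omega)]
          · rw [if_neg hkv, if_neg (by omega)]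
      rw [hset, ih]
      apply List.map_congr_left
      intro d hd
      have hd' := (PySem.List.mem_pyRange_one).mp hd
      by_cases hdv : d = lsD i
      · rw [if_pos hdv, List.filter_cons, if_pos (by simp [hdv])]
        rw [hdv, List.append_assoc, List.singleton_append]
      · rw [if_neg hdv, List.filter_cons, if_neg (by simp; omega)]

-- ===== VERDICT (by name: the statement is the Claim_ definition above) =====
theorem matured_numbers_spec : Claim_equal_matured_numbers := by
  intro numbers top_n _hdom _hpre
  unfold Spec_matured_numbers matured_numbers matured_numbers_alt
  simp only []
  set n : Int := (numbers.length : Int) with hn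
  set ls : List Int := (PySem.List.enumerate numbers 0).foldl
    (fun ls p => p.2.foldl (fun ls num => PySem.List.pySetD ls num p.1) ls)
    (List.replicate 70 (-1 : Int)) with hls
  set lsD : Int → Int := fun i => PySem.List.pyGetD ls i (-1) with hlsD
  congr 1
  -- entries of ls are -1 or a valid draw index
  have hmem : ∀ v ∈ ls, v = -1 ∨ (0 ≤ v ∧ v < n) := pv_lastSeen_mem numbers
  have hD : ∀ i, lsD i = -1 ∨ (0 ≤ lsD i ∧ lsD i < n) := by
    intro i
    rw [hlsD]
    simp only [PySem.List.pyGetD]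
    cases hg : PySem.List.pyGet? ls i with
    | none => left; rfl
    | some x =>
      simpa using hmem x (PySem.List.mem_of_pyGet?_eq_some ls hg)
  set R : List Int := PySem.List.pyRange 1 70 1 with hR
  -- A's result list as filter-map
  rw [PySem.List.foldl_append_ite (fun i => PySem.List.pyGetD ls i (-1) ≠ -1)
        (fun i => (i, PySem.List.pyGetD ls i (-1))) R []]
  rw [List.nil_append]
  set result : List (Int × Int) :=
    (R.filter (fun i => decide (PySem.List.pyGetD ls i (-1) ≠ -1))).map
      (fun i => (i, PySem.List.pyGetD ls i (-1))) with hres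
  -- sort as bucket concatenation
  have hresmem : ∀ p ∈ result, 0 ≤ p.2 ∧ p.2 < n := by
    intro p hp
    rw [hres] at hp
    rcases List.mem_map.mp hp with ⟨i, hi, hpi⟩
    have hne : lsD i ≠ -1 := by
      have := (List.mem_filter.mp hi).2
      simpa [hlsD] using this
    have := hD i
    rw [← hpi]
    simp only [hlsD] at *
    omega
  rw [pv_sorted_eq_flatMap_filter result n hresmem]
  -- B's buckets
  have hinit : List.replicate numbers.length ([] : List Int)
      = (PySem.List.pyRange 0 n 1).map (fun _ => []) := by
    simp [List.map_const', PySem.List.length_pyRange_one, hn]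
  rw [hinit]
  rw [show (fun (bs : List (List Int)) (i : Int) =>
        let v := PySem.List.pyGetD ls i (-1)
        if v ≠ -1 then PySem.List.pySetD bs v (PySem.List.pyGetD bs v [] ++ [i]) else bs)
      = (fun bs i =>
        if lsD i ≠ -1 then PySem.List.pySetD bs (lsD i) (PySem.List.pyGetD bs (lsD i) [] ++ [i]) else bs)
      from rfl]
  have hnn : n = ((numbers.length : Nat) : Int) := hn
  rw [hnn] at hD ⊢
  rw [pv_bucket_loop numbers.length lsD hD R (fun _ => [])]
  set bucketFn : Int → List Int := fun d => [] ++ R.filter (fun i => decide (lsD i = d)) with hbF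
  -- B's output flatten
  rw [show (fun (acc : List (Int × Int)) (p : Int × List Int) =>
        p.2.foldl (fun acc i => acc ++ [(i, p.1)]) acc)
      = (fun acc p => acc ++ p.2.map (fun i => (i, p.1))) from by
    funext acc p
    exact PySem.List.foldl_append_singleton_eq_map _ _ _]
  rw [PySem.List.foldl_append_eq_flatMap, List.nil_append]
  -- enumerate of the bucket list
  have hblen : PySem.List.len ((PySem.List.pyRange 0 ((numbers.length : Nat) : Int) 1).map bucketFn)
      = ((numbers.length : Nat) : Int) := by
    simp only [PySem.List.len, List.length_map, PySem.List.length_pyRange_one]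
    omega
  rw [PySem.List.enumerate_eq_map_pyRange _ ([] : List Int), hblen]
  have henum : (PySem.List.pyRange 0 ((numbers.length : Nat) : Int) 1).map
        (fun j => (j, PySem.List.pyGetD ((PySem.List.pyRange 0 ((numbers.length : Nat) : Int) 1).map bucketFn) j ([] : List Int)))
      = (PySem.List.pyRange 0 ((numbers.length : Nat) : Int) 1).map (fun j => (j, bucketFn j)) := by
    apply List.map_congr_left
    intro j hj
    have hj' := (PySem.List.mem_pyRange_one).mp hj
    rw [PySem.List.pyGetD_map_pyRange_of_nonneg bucketFn _ j _ hj'.1 hj'.2]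
  rw [henum, List.flatMap_map]
  -- pointwise bucket equality
  apply pv_flatMap_congr
  intro d hd
  have hd' := (PySem.List.mem_pyRange_one).mp hd
  show result.filter (fun p => decide (p.2 = d))
      = (R.filter (fun i => decide (lsD i = d))).map (fun i => (i, d))
  rw [hres]
  rw [List.filter_map]
  rw [List.filter_filter]
  have hfil : (R.filter (fun i =>
        ((fun (p : Int × Int) => decide (p.2 = d)) ∘ (fun i => (i, PySem.List.pyGetD ls i (-1)))) i
          && decide (PySem.List.pyGetD ls i (-1) ≠ -1)))
      = R.filter (fun i => decide (lsD i = d)) := by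
    apply List.filter_congr
    intro i _
    simp only [Function.comp, hlsD]
    by_cases hid : PySem.List.pyGetD ls i (-1) = d
    · simp [hid]; omega
    · simp [hid]
  rw [hfil]
  apply List.map_congr_left
  intro i hi
  have : lsD i = d := by simpa [hlsD] using (List.mem_filter.mp hi).2
  simp only [hlsD] at this
  rw [this]
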